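-- pv_equiv track=rewrite | github.com/thattazhi/Coding_Problems | Python/bartersystem.py | find_ex_rate
-- ===== SOURCE A (Python) =====
-- def find_ex_rate(triplets, query, N):
--     if query[0] == query[1]:
--         return 1
--
--     for i in range(N):
--         if query[0] == triplets[i][0]:
--             if triplets[i][1] == query[1]:
--                 Output = int(triplets[i][2])
--                 return Output
--
--             else:
--                 query = [triplets[i][1], query[1]]
--                 j = find_ex_rate(triplets, query, N)
--                 Output = j * int(triplets[i][2])
--                 return Output
--
--     return -1
-- ===== SOURCE B (Python) =====
-- def find_ex_rate(triplets, query, N):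
--     s, d = query[0], query[1]
--     if s == d:
--         return 1
--     product = 1
--     seen = []
--     while s not in seen:
--         seen.append(s)
--         for i in range(N):
--             t = triplets[i]
--             if t[0] == s:
--                 rate = int(t[2])
--                 if t[1] == d:
--                     return product * rate
--                 product *= rate
--                 s = t[1]
--                 break
--         else:
--             return -1
--     return -1  # cyclic rate table: no conversion chain exists
-- ===== Notes on version B (the rewrite author's own statement) =====
-- stated objective: alternative
-- what changed: A's recursion (recompute the chain tail, multiply the rates on unwind) is replaced by an iterative loop with a running product, a moving source and a visited-source list that makes a cyclic table terminate with -1 instead of exhausting the stack.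
-- intended difference: On queries whose first-match chain dead-ends after accumulating rates with product p != 1, A returns -p (its dead-end -1 multiplied through the unwound rates) while B returns the plain failure value -1, the intended 'no conversion found' answer. — e.g. on find_ex_rate([["a", "b", "2"], ["b", "c", "3"]], ["a", "z"], 2): A returns -6, B returns -1
import Mathlib
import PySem

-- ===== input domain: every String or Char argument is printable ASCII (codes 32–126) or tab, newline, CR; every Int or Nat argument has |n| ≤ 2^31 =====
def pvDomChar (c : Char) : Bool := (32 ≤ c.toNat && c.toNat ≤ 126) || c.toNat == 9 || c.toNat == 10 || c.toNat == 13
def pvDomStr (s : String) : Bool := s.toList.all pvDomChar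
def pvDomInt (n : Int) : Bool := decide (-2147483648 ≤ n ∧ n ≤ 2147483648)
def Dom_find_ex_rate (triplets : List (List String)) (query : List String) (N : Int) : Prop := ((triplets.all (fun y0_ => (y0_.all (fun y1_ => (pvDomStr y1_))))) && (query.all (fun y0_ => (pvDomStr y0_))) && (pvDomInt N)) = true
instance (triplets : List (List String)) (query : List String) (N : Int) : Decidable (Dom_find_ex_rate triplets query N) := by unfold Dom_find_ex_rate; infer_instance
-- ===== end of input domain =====

-- B replaces A's recursion (recompute the tail, multiply on unwind) by an iterative loop with a
-- running product and a visited-source list; on a dead-end chain B returns the plain failure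
-- value -1 where A returns -1 times the rates accumulated so far (stated as D_ below).


-- ===== PORT A =====
-- the 'for i in range(N)' scan: first i with query[0] == triplets[i][0];
-- none = an IndexError occurred, some none = the loop fell through, some (some t) = matched triplet t
def pvScanA (triplets : List (List String)) (q0 : String) : List Int → Option (Option (List String))
  | [] => some none
  | i :: rest =>
    match PySem.List.pyGet? triplets i with
    | none => none
    | some t =>
      match PySem.List.pyGet? t 0 with
      | none => none
      | some t0 => if q0 == t0 then some (some t) else pvScanA triplets q0 rest

-- A's recursion, with fuel making it total; 0 on fuel exhaustion / IndexError / ValueError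
-- (all outside Pre_); fuel triplets.length + 3 exceeds the recursion depth whenever A returns
def pvFindA (triplets : List (List String)) (N : Int) : Nat → List String → Int
  | 0, _ => 0
  | fuel+1, query =>
    match PySem.List.pyGet? query 0, PySem.List.pyGet? query 1 with
    | some q0, some q1 =>
      if q0 == q1 then 1
      else
        match pvScanA triplets q0 (PySem.List.pyRange 0 N 1) with
        | none => 0
        | some none => -1
        | some (some t) =>
          match PySem.List.pyGet? t 1 with
          | none => 0
          | some t1 =>
            if t1 == q1 then
              match PySem.List.pyGet? t 2 with
              | none => 0
              | some t2 =>
                match PySem.Int.ofStr? t2 with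
                | none => 0
                | some r => r
            else
              match PySem.List.pyGet? t 2 with
              | none => 0
              | some t2 =>
                match PySem.Int.ofStr? t2 with
                | none => 0
                | some r => pvFindA triplets N fuel [t1, q1] * r
    | _, _ => 0

def find_ex_rate (triplets : List (List String)) (query : List String) (N : Int) : Int :=
  pvFindA triplets N (triplets.length + 3) query

-- ===== PORT B =====
-- outcome of one pass of B's inner 'for i in range(N)' scan
inductive PvBStep where
  | err                          -- IndexError / ValueError (outside Pre_)
  | deadEnd                      -- for-else: no triplet with source s
  | final (r : Int)              -- matched, destination reached: return product * rate
  | next (r : Int) (s : String)  -- matched, continue with new source s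
deriving DecidableEq, Repr

def pvScanB (triplets : List (List String)) (s d : String) : List Int → PvBStep
  | [] => .deadEnd
  | i :: rest =>
    match PySem.List.pyGet? triplets i with
    | none => .err
    | some t =>
      match PySem.List.pyGet? t 0 with
      | none => .err
      | some t0 =>
        if t0 == s then
          match PySem.List.pyGet? t 2 with
          | none => .err
          | some t2 =>
            match PySem.Int.ofStr? t2 with
            | none => .err
            | some rate =>
              match PySem.List.pyGet? t 1 with
              | none => .err
              | some t1 => if t1 == d then .final rate else .next rate t1
        else pvScanB triplets s d rest

-- B's 'while s not in seen' loop carrying (seen, s, product); the fuel argument only makes the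
-- recursion structural — B's loop runs at most triplets.length + 1 times whenever it returns,
-- so fuel triplets.length + 2 is never exhausted on an input where the Python returns
def pvLoopB (triplets : List (List String)) (d : String) (N : Int) : Nat → List String → String → Int → Int
  | 0, _, _, _ => 0
  | fuel+1, seen, s, product =>
    if s ∈ seen then -1
    else
      match pvScanB triplets s d (PySem.List.pyRange 0 N 1) with
      | .err => 0
      | .deadEnd => -1
      | .final r => product * r
      | .next r s' => pvLoopB triplets d N fuel (s :: seen) s' (product * r)

def find_ex_rate_alt (triplets : List (List String)) (query : List String) (N : Int) : Int :=
  match PySem.List.pyGet? query 0, PySem.List.pyGet? query 1 with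
  | some s, some d => if s == d then 1 else pvLoopB triplets d N (triplets.length + 2) [] s 1
  | _, _ => 0

-- ===== PRECONDITION & SPEC =====
-- one step of the first-match chain, read off the table prefix: none = A raises on this step
-- (the first empty-or-matching triplet is empty or shorter than 3, or its rate is not an
-- integer); some none = no triplet with source s; some (some (nxt, r)) = step to nxt with rate r
def pvStep (tab : List (List String)) (s : String) : Option (Option (String × Int)) :=
  match tab.find? (fun t => t.isEmpty || t.headD "" == s) with
  | none => some none
  | some t =>
    if t.length < 3 then none
    else (PySem.Int.ofStr? (t.getD 2 "")).map (fun r => some (t.getD 1 "", r))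

-- the walk of the first-match chain from s towards d: none = A raises somewhere along it
-- (a bad step, or a revisited source = infinite recursion); some (true, p) = d reached with
-- rate product p; some (false, p) = dead end after rates with product p.  The fuel only makes
-- the recursion structural: the seen-list check fires before tab.length + 2 steps are taken.
def pvWalk (tab : List (List String)) (d : String) : Nat → List String → String → Option (Bool × Int)
  | 0, _, _ => none
  | fuel+1, seen, s =>
    if s ∈ seen then none
    else
      match pvStep tab s with
      | none => none
      | some none => some (false, 1)
      | some (some (nxt, r)) =>
        if nxt = d then some (true, r)
        else (pvWalk tab d fuel (s :: seen) nxt).map (fun p => (p.1, r * p.2))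

def pvChainTop (triplets : List (List String)) (query : List String) (N : Int) : Option (Bool × Int) :=
  pvWalk (triplets.take N.toNat) (query.getD 1 "") (triplets.length + 2) [] (query.getD 0 "")

-- the dead-end walk D_ is decided by: some p = the chain dead-ends with rate product p,
-- none = it reaches the destination or A raises along it (bad triplet / revisited source)
def pvDeadWalk (tab : List (List String)) (d : String) : Nat → List String → String → Option Int
  | 0, _, _ => none
  | f+1, seen, s =>
    if s ∈ seen then none
    else
      match tab.find? (fun t => t.isEmpty || t.headD "" == s) with
      | none => some 1
      | some t =>
        if t.getD 1 "" = d then none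
        else Option.map₂ Mul.mul (PySem.Int.ofStr? (t.getD 2 ""))
          (pvDeadWalk tab d f (s :: seen) (t.getD 1 ""))

def pvChainOk (triplets : List (List String)) (query : List String) (N : Int) : Bool :=
  match pvChainTop triplets query N with
  | none => false
  | some (true, _) => true
  | some (false, _) => decide (N ≤ (triplets.length : Int))

-- Pre_ excludes exactly the inputs on which A raises: queries shorter than 2 (IndexError), and —
-- unless query[0] = query[1] — chains that hit a malformed or non-integer-rate triplet
-- (IndexError/ValueError), revisit a source (RecursionError), or, when N exceeds the table
-- length, index past its end (IndexError).
def Pre_find_ex_rate (triplets : List (List String)) (query : List String) (N : Int) : Prop :=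
  2 ≤ query.length ∧
  (query.getD 0 "" = query.getD 1 "" ∨ pvChainOk triplets query N = true)

instance (triplets : List (List String)) (query : List String) (N : Int) : Decidable (Pre_find_ex_rate triplets query N) := by unfold Pre_find_ex_rate; infer_instance

def pvWitness_find_ex_rate : List (List String) × List String × Int :=
  ([["usd", "gbp", "2"], ["gbp", "eur", "3"]], ["usd", "eur"], 2)

-- On queries whose first-match chain dead-ends after accumulating rates with product p ≠ 1,
-- A returns -p (its dead-end -1 multiplied through the unwound rates) while B returns the plain
-- failure value -1, the intended 'no conversion found' answer.
def D_find_ex_rate (triplets : List (List String)) (query : List String) (N : Int) : Prop :=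
  2 ≤ query.length ∧ query.getD 0 "" ≠ query.getD 1 "" ∧
  (pvDeadWalk (triplets.take N.toNat) (query.getD 1 "")
    (triplets.length + 2) [] (query.getD 0 "")).getD 1 ≠ 1

instance (triplets : List (List String)) (query : List String) (N : Int) : Decidable (D_find_ex_rate triplets query N) := by unfold D_find_ex_rate; infer_instance

def Spec_find_ex_rate (triplets : List (List String)) (query : List String) (N : Int) (out : Int) : Prop := ¬ D_find_ex_rate triplets query N → out = find_ex_rate_alt triplets query N
instance (triplets : List (List String)) (query : List String) (N : Int) (out : Int) : Decidable (Spec_find_ex_rate triplets query N out) := by unfold Spec_find_ex_rate; infer_instance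

def pvDiffWitness_find_ex_rate : List (List String) × List String × Int :=
  ([["a", "b", "2"], ["b", "c", "3"]], ["a", "z"], 2)

def pvDiffWitnessOut_find_ex_rate : Int × Int := (-6, -1)

-- ===== CLAIM (what is proved, stated in full; the proofs are below) =====
def Claim_unchanged_find_ex_rate : Prop := ∀ (triplets : List (List String)) (query : List String) (N : Int), Dom_find_ex_rate triplets query N → Pre_find_ex_rate triplets query N → Spec_find_ex_rate triplets query N (find_ex_rate triplets query N)
def Claim_changed_find_ex_rate : Prop := Dom_find_ex_rate (pvDiffWitness_find_ex_rate.1) (pvDiffWitness_find_ex_rate.2.1) (pvDiffWitness_find_ex_rate.2.2) ∧ Pre_find_ex_rate (pvDiffWitness_find_ex_rate.1) (pvDiffWitness_find_ex_rate.2.1) (pvDiffWitness_find_ex_rate.2.2) ∧ D_find_ex_rate (pvDiffWitness_find_ex_rate.1) (pvDiffWitness_find_ex_rate.2.1) (pvDiffWitness_find_ex_rate.2.2) ∧ find_ex_rate (pvDiffWitness_find_ex_rate.1) (pvDiffWitness_find_ex_rate.2.1) (pvDiffWitness_find_ex_rate.2.2) = pvDiffWitnessOut_find_ex_rate.1 ∧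 find_ex_rate_alt (pvDiffWitness_find_ex_rate.1) (pvDiffWitness_find_ex_rate.2.1) (pvDiffWitness_find_ex_rate.2.2) = pvDiffWitnessOut_find_ex_rate.2 ∧ pvDiffWitnessOut_find_ex_rate.1 ≠ pvDiffWitnessOut_find_ex_rate.2
def Claim_exact_find_ex_rate : Prop := ∀ (triplets : List (List String)) (query : List String) (N : Int), Dom_find_ex_rate triplets query N → Pre_find_ex_rate triplets query N → D_find_ex_rate triplets query N → find_ex_rate triplets query N ≠ find_ex_rate_alt triplets query N

-- ===== LEMMAS AND PROOFS =====

theorem pvBeqSymmFalse {a b : String} (h : ¬ (a == b) = true) : (b == a) = false := by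
  cases hb : b == a
  · rfl
  · exact absurd (beq_iff_eq.mpr (beq_iff_eq.mp hb).symm) h

-- proof-only structural version of the scan behind pvStep
def pvScanC : List (List String) → String → Option (Option (List String))
  | [], _ => some none
  | t :: rest, s =>
    match t[0]? with
    | none => none
    | some t0 => if s == t0 then some (some t) else pvScanC rest s

-- proof-only structural version of pvWalk, stepping through pvScanC
def pvChain (tab : List (List String)) (d : String) : Nat → List String → String → Option (Bool × List Int)
  | 0, _, _ => none
  | fuel+1, seen, s =>
    if s ∈ seen then none
    else
      match pvScanC tab s with
      | none => none
      | some none => some (false, [])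
      | some (some t) =>
        match t[1]? with
        | none => none
        | some t1 =>
          match t[2]? with
          | none => none
          | some t2 =>
            match PySem.Int.ofStr? t2 with
            | none => none
            | some r =>
              if t1 = d then some (true, [r])
              else
                match pvChain tab d fuel (s :: seen) t1 with
                | none => none
                | some (b, rs) => some (b, r :: rs)

theorem pvGetD_of_len (t : List String) (k : Nat) (h : k < t.length) :
    t[k]? = some (t.getD k "") := by
  rw [List.getElem?_eq_getElem h, List.getD_eq_getElem t "" h]

-- pvStep's find? seen through the structural scan
theorem pvScanC_find (tab : List (List String)) (s : String) :
    pvScanC tab s =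
      match tab.find? (fun t => t.isEmpty || t.headD "" == s) with
      | none => some none
      | some t => if t.isEmpty then none else some (some t) := by
  induction tab with
  | nil => rfl
  | cons t rest ih =>
    cases t with
    | nil =>
      rw [List.find?_cons_of_pos (p := fun t : List String => t.isEmpty || t.headD "" == s) (by simp)]
      rfl
    | cons a t' =>
      by_cases hs : s == a
      · have hp : ((a :: t').isEmpty || (a :: t').headD "" == s) = true := by
          simp only [List.isEmpty_cons, List.headD_cons, Bool.false_or]
          exact beq_iff_eq.mpr (beq_iff_eq.mp hs).symm
        rw [List.find?_cons_of_pos (p := fun t : List String => t.isEmpty || t.headD "" == s) hp]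
        simp [pvScanC, hs]
      · have hp : ¬ ((a :: t').isEmpty || (a :: t').headD "" == s) = true := by
          simp only [List.isEmpty_cons, List.headD_cons, Bool.false_or]
          simp [pvBeqSymmFalse hs]
        rw [List.find?_cons_of_neg (p := fun t : List String => t.isEmpty || t.headD "" == s) hp]
        simp only [pvScanC, List.getElem?_cons_zero, hs, Bool.false_eq_true, if_false]
        exact ih

-- the find?-based walk agrees with the structural one the proofs use
theorem pvWalk_eq_pvChain (tab : List (List String)) (d : String) :
    ∀ (f : Nat) (seen : List String) (s : String),
      pvWalk tab d f seen s = (pvChain tab d f seen s).map (fun p => (p.1, p.2.prod)) := by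
  intro f
  induction f with
  | zero => intro seen s; rfl
  | succ m ih =>
    intro seen s
    by_cases hm : s ∈ seen
    · simp [pvWalk, pvChain, hm]
    · simp only [pvWalk, pvChain, hm, if_false]
      cases hf : tab.find? (fun t => t.isEmpty || t.headD "" == s) with
      | none =>
        have hscan : pvScanC tab s = some none := by rw [pvScanC_find, hf]
        rw [hscan]
        simp only [pvStep]
        rw [hf]
        simp
      | some t =>
        by_cases hemp : t.isEmpty
        · have hscan : pvScanC tab s = none := by rw [pvScanC_find, hf]; simp [hemp]
          rw [hscan]
          simp only [pvStep]
          rw [hf]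
          have h3 : t.length < 3 := by
            rw [List.isEmpty_iff] at hemp
            simp [hemp]
          simp [if_pos h3]
        · have hscan : pvScanC tab s = some (some t) := by
            rw [pvScanC_find, hf]; simp [hemp]
          rw [hscan]
          simp only [pvStep]
          rw [hf]
          by_cases h3 : t.length < 3
          · have h2 : t[2]? = none := List.getElem?_eq_none (by omega)
            simp only [if_pos h3]
            cases t[1]? <;> simp [h2]
          · have hg1 : t[1]? = some (t.getD 1 "") := pvGetD_of_len t 1 (by omega)
            have hg2 : t[2]? = some (t.getD 2 "") := pvGetD_of_len t 2 (by omega)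
            simp only [if_neg h3, hg1, hg2]
            cases hr : PySem.Int.ofStr? (t.getD 2 "") with
            | none => simp
            | some r =>
              simp only [Option.map_some]
              by_cases hd : t.getD 1 "" = d
              · rw [if_pos hd, if_pos hd]
                simp
              · rw [if_neg hd, if_neg hd, ih]
                cases pvChain tab d m (s :: seen) (t.getD 1 "") with
                | none => simp
                | some p => cases p; simp

-- the dead-end walk seen through the structural chain
theorem pvDeadWalk_eq (tab : List (List String)) (d : String) :
    ∀ (f : Nat) (seen : List String) (s : String),
      pvDeadWalk tab d f seen s =
        match pvChain tab d f seen s with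
        | some (false, rs) => some rs.prod
        | _ => none := by
  intro f
  induction f with
  | zero => intro seen s; rfl
  | succ m ih =>
    intro seen s
    by_cases hm : s ∈ seen
    · simp only [pvDeadWalk, pvChain, if_pos hm]
    · simp only [pvDeadWalk, pvChain, hm, if_false]
      cases hf : tab.find? (fun t => t.isEmpty || t.headD "" == s) with
      | none =>
        have hscan : pvScanC tab s = some none := by rw [pvScanC_find, hf]
        rw [hscan]
        simp
      | some t =>
        by_cases hemp : t.isEmpty
        · have hscan : pvScanC tab s = none := by rw [pvScanC_find, hf]; simp [hemp]
          rw [hscan]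
          rw [List.isEmpty_iff] at hemp
          subst hemp
          dsimp only
          split_ifs <;>
            simp [Option.map₂, show PySem.Int.ofStr? "" = none from rfl]
        · have hscan : pvScanC tab s = some (some t) := by
            rw [pvScanC_find, hf]; simp [hemp]
          rw [hscan]
          dsimp only
          by_cases h3 : t.length < 3
          · have h2 : t[2]? = none := List.getElem?_eq_none (by omega)
            have hr0 : PySem.Int.ofStr? (t.getD 2 "") = none := by
              rw [List.getD_eq_getElem?_getD, List.getElem?_eq_none (by omega)]; rfl
            by_cases hd : t.getD 1 "" = d
            · rw [if_pos hd]
              cases t[1]? <;> simp [h2]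
            · rw [if_neg hd, hr0]
              cases t[1]? <;> simp [h2, Option.map₂]
          · have hg1 : t[1]? = some (t.getD 1 "") := pvGetD_of_len t 1 (by omega)
            have hg2 : t[2]? = some (t.getD 2 "") := pvGetD_of_len t 2 (by omega)
            simp only [hg1, hg2]
            by_cases hd : t.getD 1 "" = d
            · rw [if_pos hd]
              have hd' : t[1]?.getD "" = d := by
                rw [List.getD_eq_getElem?_getD] at hd; exact hd
              cases hr : PySem.Int.ofStr? (t.getD 2 "") <;> simp [hd']
            · rw [if_neg hd]
              cases hr : PySem.Int.ofStr? (t.getD 2 "") with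
              | none => simp [Option.map₂]
              | some r =>
                dsimp only
                rw [if_neg hd, ih]
                cases pvChain tab d m (s :: seen) (t.getD 1 "") with
                | none => simp [Option.map₂]
                | some p =>
                  obtain ⟨b, rs⟩ := p
                  cases b <;> simp [Option.map₂, Mul.mul]

theorem pvGet_pair (a b : String) :
    PySem.List.pyGet? [a, b] 0 = some a ∧ PySem.List.pyGet? [a, b] 1 = some b := by
  constructor <;> rfl

theorem pvQGet (q : List String) (h : 2 ≤ q.length) :
    PySem.List.pyGet? q 0 = some (q.getD 0 "") ∧ PySem.List.pyGet? q 1 = some (q.getD 1 "") := by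
  have h1 : (1 : Int) = ((1 : Nat) : Int) := by norm_num
  constructor
  · rw [PySem.List.pyGet?_zero, List.getElem?_eq_getElem (by omega),
      List.getD_eq_getElem q "" (by omega)]
  · rw [h1, PySem.List.pyGet?_natCast, List.getElem?_eq_getElem (by omega),
      List.getD_eq_getElem q "" (by omega)]

theorem pvTGet (t : List String) (k : Nat) :
    PySem.List.pyGet? t (k : Int) = t[k]? := PySem.List.pyGet?_natCast t k

-- B's structural scan over the table prefix, used only in the proofs
def pvTabB : List (List String) → String → String → PvBStep
  | [], _, _ => PvBStep.deadEnd
  | t :: rest, s, d =>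
    match t[0]? with
    | none => PvBStep.err
    | some t0 =>
      if t0 == s then
        match t[2]? with
        | none => PvBStep.err
        | some t2 =>
          match PySem.Int.ofStr? t2 with
          | none => PvBStep.err
          | some rate =>
            match t[1]? with
            | none => PvBStep.err
            | some t1 => if t1 == d then PvBStep.final rate else PvBStep.next rate t1
      else pvTabB rest s d

theorem pvScanA_range (m : Nat) (triplets : List (List String)) (s : String) (N : Int)
    (hN : N ≤ triplets.length) :
    ∀ j : Nat, m = N.toNat - j →
      pvScanA triplets s (PySem.List.pyRange j N 1) =
        pvScanC ((triplets.take N.toNat).drop j) s := by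
  induction m with
  | zero =>
    intro j hj
    have h1 : PySem.List.pyRange j N 1 = [] := by
      simp [PySem.List.pyRange_one]
      omega
    have h2 : (triplets.take N.toNat).drop j = [] := by
      apply List.drop_eq_nil_of_le
      simp; omega
    rw [h1, h2]; rfl
  | succ m ih =>
    intro j hj
    have hlt : (j : Int) < N := by omega
    have hjlen : j < triplets.length := by omega
    have hjtake : j < (triplets.take N.toNat).length := by simp; omega
    rw [PySem.List.pyRange_one_cons hlt]
    rw [List.drop_eq_getElem_cons hjtake]
    have hget : PySem.List.pyGet? triplets (j : Int) = some triplets[j] := by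
      rw [PySem.List.pyGet?_natCast, List.getElem?_eq_getElem hjlen]
    have htake : (triplets.take N.toNat)[j] = triplets[j] := List.getElem_take
    simp only [pvScanA, pvScanC, PySem.List.pyGet?_zero, hget, htake]
    cases triplets[j][0]? with
    | none => simp
    | some t0 =>
      by_cases hs : s == t0
      · simp [hs]
      · simp only [hs, Bool.false_eq_true, if_false]
        have hc : ((j : Int) + 1) = ((j + 1 : Nat) : Int) := by push_cast; ring
        rw [hc, ih (j + 1) (by omega)]

theorem pvScanB_range (m : Nat) (triplets : List (List String)) (s d : String) (N : Int)
    (hN : N ≤ triplets.length) :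
    ∀ j : Nat, m = N.toNat - j →
      pvScanB triplets s d (PySem.List.pyRange j N 1) =
        pvTabB ((triplets.take N.toNat).drop j) s d := by
  induction m with
  | zero =>
    intro j hj
    have h1 : PySem.List.pyRange j N 1 = [] := by
      simp [PySem.List.pyRange_one]
      omega
    have h2 : (triplets.take N.toNat).drop j = [] := by
      apply List.drop_eq_nil_of_le
      simp; omega
    rw [h1, h2]; rfl
  | succ m ih =>
    intro j hj
    have hlt : (j : Int) < N := by omega
    have hjlen : j < triplets.length := by omega
    have hjtake : j < (triplets.take N.toNat).length := by simp; omega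
    rw [PySem.List.pyRange_one_cons hlt]
    rw [List.drop_eq_getElem_cons hjtake]
    have hget : PySem.List.pyGet? triplets (j : Int) = some triplets[j] := by
      rw [PySem.List.pyGet?_natCast, List.getElem?_eq_getElem hjlen]
    have htake : (triplets.take N.toNat)[j] = triplets[j] := List.getElem_take
    simp only [pvScanB, pvTabB, PySem.List.pyGet?_zero, hget, htake]
    cases triplets[j][0]? with
    | none => simp
    | some t0 =>
      by_cases hs : t0 == s
      · simp only [hs, if_true]
        have h1 : (1 : Int) = ((1 : Nat) : Int) := by norm_num
        have h2 : (2 : Int) = ((2 : Nat) : Int) := by norm_num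
        rw [h1, h2, PySem.List.pyGet?_natCast, PySem.List.pyGet?_natCast]
      · simp only [hs, Bool.false_eq_true, if_false]
        have hc : ((j : Int) + 1) = ((j + 1 : Nat) : Int) := by push_cast; ring
        rw [hc, ih (j + 1) (by omega)]

-- found-case range lemmas, valid without N ≤ triplets.length (the match is inside the table)
theorem pvScanA_range_found (m : Nat) (triplets : List (List String)) (s : String) (N : Int)
    (t : List String) :
    ∀ j : Nat, m = N.toNat - j →
      pvScanC ((triplets.take N.toNat).drop j) s = some (some t) →
      pvScanA triplets s (PySem.List.pyRange j N 1) = some (some t) := by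
  induction m with
  | zero =>
    intro j hj hc
    have h2 : (triplets.take N.toNat).drop j = [] := by
      apply List.drop_eq_nil_of_le
      simp; omega
    rw [h2] at hc; simp [pvScanC] at hc
  | succ m ih =>
    intro j hj hc
    by_cases hjt : j < (triplets.take N.toNat).length
    · have hjlen : j < triplets.length := by simp at hjt; omega
      have hlt : (j : Int) < N := by simp at hjt; omega
      rw [List.drop_eq_getElem_cons hjt] at hc
      rw [PySem.List.pyRange_one_cons hlt]
      have hget : PySem.List.pyGet? triplets (j : Int) = some triplets[j] := by
        rw [PySem.List.pyGet?_natCast, List.getElem?_eq_getElem hjlen]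
      have htake : (triplets.take N.toNat)[j] = triplets[j] := List.getElem_take
      simp only [pvScanC, htake] at hc
      simp only [pvScanA, PySem.List.pyGet?_zero, hget]
      cases hg : triplets[j][0]? with
      | none => rw [hg] at hc; simp at hc
      | some t0 =>
        rw [hg] at hc
        by_cases hs : s == t0
        · simp only [hs, if_true] at hc ⊢; exact hc
        · simp only [hs, Bool.false_eq_true, if_false] at hc ⊢
          have hcast : ((j : Int) + 1) = ((j + 1 : Nat) : Int) := by push_cast; ring
          rw [hcast]
          exact ih (j + 1) (by omega) hc
    · have h2 : (triplets.take N.toNat).drop j = [] := by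
        apply List.drop_eq_nil_of_le; omega
      rw [h2] at hc; simp [pvScanC] at hc

theorem pvScanB_range_found (m : Nat) (triplets : List (List String)) (s d : String) (N : Int)
    (t : List String) :
    ∀ j : Nat, m = N.toNat - j →
      pvScanC ((triplets.take N.toNat).drop j) s = some (some t) →
      pvScanB triplets s d (PySem.List.pyRange j N 1) =
        pvTabB ((triplets.take N.toNat).drop j) s d := by
  induction m with
  | zero =>
    intro j hj hc
    have h2 : (triplets.take N.toNat).drop j = [] := by
      apply List.drop_eq_nil_of_le
      simp; omega
    rw [h2] at hc; simp [pvScanC] at hc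
  | succ m ih =>
    intro j hj hc
    by_cases hjt : j < (triplets.take N.toNat).length
    · have hjlen : j < triplets.length := by simp at hjt; omega
      have hlt : (j : Int) < N := by simp at hjt; omega
      rw [List.drop_eq_getElem_cons hjt] at hc ⊢
      rw [PySem.List.pyRange_one_cons hlt]
      have hget : PySem.List.pyGet? triplets (j : Int) = some triplets[j] := by
        rw [PySem.List.pyGet?_natCast, List.getElem?_eq_getElem hjlen]
      have htake : (triplets.take N.toNat)[j] = triplets[j] := List.getElem_take
      simp only [pvScanC, htake] at hc
      simp only [pvScanB, pvTabB, PySem.List.pyGet?_zero, hget, htake]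
      cases hg : triplets[j][0]? with
      | none => rw [hg] at hc
      | some t0 =>
        rw [hg] at hc
        by_cases hs : t0 == s
        · simp only [hs, if_true]
          have h1 : (1 : Int) = ((1 : Nat) : Int) := by norm_num
          have h2 : (2 : Int) = ((2 : Nat) : Int) := by norm_num
          rw [h1, h2, PySem.List.pyGet?_natCast, PySem.List.pyGet?_natCast]
        · have hs' : (s == t0) = false := pvBeqSymmFalse hs
          simp only [hs, hs', Bool.false_eq_true, if_false] at hc ⊢
          have hcast : ((j : Int) + 1) = ((j + 1 : Nat) : Int) := by push_cast; ring
          rw [hcast]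
          exact ih (j + 1) (by omega) hc
    · exfalso
      have h2 : (triplets.take N.toNat).drop j = [] := by
        apply List.drop_eq_nil_of_le; omega
      rw [h2] at hc; simp [pvScanC] at hc

-- pvScanC outcome determines pvTabB's outcome
theorem pvTabB_dead (l : List (List String)) (s d : String)
    (h : pvScanC l s = some none) : pvTabB l s d = PvBStep.deadEnd := by
  induction l with
  | nil => rfl
  | cons t rest ih =>
    simp only [pvScanC] at h
    cases hg : t[0]? with
    | none => rw [hg] at h; simp at h
    | some t0 =>
      rw [hg] at h
      by_cases hs : s == t0
      · simp [hs] at h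
      · have hs' : (t0 == s) = false := pvBeqSymmFalse hs
        simp only [hs, Bool.false_eq_true, if_false] at h
        simp only [pvTabB, hg, hs', Bool.false_eq_true, if_false]
        exact ih h

theorem pvTabB_found (l : List (List String)) (s d : String) (t : List String)
    (t1 t2 : String) (r : Int)
    (h : pvScanC l s = some (some t)) (h1 : t[1]? = some t1) (h2 : t[2]? = some t2)
    (hr : PySem.Int.ofStr? t2 = some r) :
    pvTabB l s d = if t1 = d then PvBStep.final r else PvBStep.next r t1 := by
  induction l with
  | nil => simp [pvScanC] at h
  | cons u rest ih =>
    simp only [pvScanC] at h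
    cases hg : u[0]? with
    | none => rw [hg] at h; simp at h
    | some t0 =>
      rw [hg] at h
      by_cases hs : s == t0
      · simp only [hs, if_true] at h
        injection h with h; injection h with h; subst h
        have hs' : (t0 == s) = true := by rw [beq_iff_eq] at hs ⊢; exact hs.symm
        simp only [pvTabB, hg, hs', if_true, h2, hr, h1]
        by_cases hd : t1 = d
        · rw [if_pos (beq_iff_eq.mpr hd), if_pos hd]
        · rw [if_neg (by simpa using hd), if_neg hd]
      · have hs' : (t0 == s) = false := pvBeqSymmFalse hs
        simp only [hs, Bool.false_eq_true, if_false] at h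
        simp only [pvTabB, hg, hs', Bool.false_eq_true, if_false]
        exact ih h

-- the chain's rate list is shorter than the fuel it was computed with
theorem pvChain_len (tab : List (List String)) (d : String) :
    ∀ (f : Nat) (seen : List String) (s : String) (b : Bool) (rs : List Int),
      pvChain tab d f seen s = some (b, rs) → rs.length ≤ f := by
  intro f
  induction f with
  | zero => intro seen s b rs h; simp [pvChain] at h
  | succ m ih =>
    intro seen s b rs h
    simp only [pvChain] at h
    split at h
    · simp at h
    · cases hc : pvScanC tab s with
      | none => rw [hc] at h; simp at h
      | some o =>
        rw [hc] at h
        cases o with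
        | none => simp at h; rw [h.2]; simp
        | some t =>
          simp only at h
          cases h1 : t[1]? with
          | none => rw [h1] at h; simp at h
          | some t1 =>
            rw [h1] at h; dsimp only at h
            cases h2 : t[2]? with
            | none => rw [h2] at h; simp at h
            | some t2 =>
              rw [h2] at h; dsimp only at h
              cases hr : PySem.Int.ofStr? t2 with
              | none => rw [hr] at h; simp at h
              | some r =>
                rw [hr] at h; dsimp only at h
                split at h
                · simp at h; rw [← h.2]; simp
                · cases hrec : pvChain tab d m (s :: seen) t1 with
                  | none => rw [hrec] at h; simp at h
                  | some p =>
                    rw [hrec] at h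
                    obtain ⟨b', rs'⟩ := p
                    simp only [Option.some.injEq, Prod.mk.injEq] at h
                    obtain ⟨hb, hrs⟩ := h
                    subst hb
                    rw [← hrs]
                    have := ih (s :: seen) t1 b' rs' hrec
                    simp
                    omega

-- A's recursion computes (±1) * product of the chain's rates
theorem pvChainA (triplets : List (List String)) (dst : String) (N : Int) :
    ∀ (f : Nat) (seen : List String) (s : String) (b : Bool) (rs : List Int),
      pvChain (triplets.take N.toNat) dst f seen s = some (b, rs) → s ≠ dst →
      (b = false → N ≤ triplets.length) →
      ∀ (fuelA : Nat) (q : List String), rs.length < fuelA →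
        PySem.List.pyGet? q 0 = some s → PySem.List.pyGet? q 1 = some dst →
        pvFindA triplets N fuelA q = (if b then 1 else -1) * rs.prod := by
  intro f
  induction f with
  | zero => intro seen s b rs h; simp [pvChain] at h
  | succ m ih =>
    intro seen s b rs h hsd hbN fuelA q hfu hq0 hq1
    obtain ⟨fa, rfl⟩ : ∃ fa, fuelA = fa + 1 := ⟨fuelA - 1, by omega⟩
    have hbeq : (s == dst) = false := by simp [hsd]
    simp only [pvChain] at h
    split at h
    · simp at h
    · cases hc : pvScanC (triplets.take N.toNat) s with
      | none => rw [hc] at h; simp at h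
      | some o =>
        rw [hc] at h
        cases o with
        | none =>
          simp only [Option.some.injEq, Prod.mk.injEq] at h
          obtain ⟨hb1, hrs⟩ := h
          subst hb1; subst hrs
          have hN : N ≤ triplets.length := hbN rfl
          have hsA : pvScanA triplets s (PySem.List.pyRange 0 N 1) =
              pvScanC (triplets.take N.toNat) s := by
            have := pvScanA_range N.toNat triplets s N hN 0 (by omega)
            simpa using this
          simp only [pvFindA, hq0, hq1, hbeq, Bool.false_eq_true, if_false, hsA, hc]
          norm_num
        | some t =>
          dsimp only at h
          cases h1 : t[1]? with
          | none => rw [h1] at h; simp at h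
          | some t1 =>
            rw [h1] at h; dsimp only at h
            cases h2 : t[2]? with
            | none => rw [h2] at h; simp at h
            | some t2 =>
              rw [h2] at h; dsimp only at h
              cases hr : PySem.Int.ofStr? t2 with
              | none => rw [hr] at h; simp at h
              | some r =>
                rw [hr] at h; dsimp only at h
                have hsA : pvScanA triplets s (PySem.List.pyRange 0 N 1) = some (some t) := by
                  have := pvScanA_range_found N.toNat triplets s N t 0 (by omega) (by simpa using hc)
                  simpa using this
                have hg1 : PySem.List.pyGet? t 1 = some t1 := by
                  rw [show (1 : Int) = ((1 : Nat) : Int) by norm_num, pvTGet]; exact h1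
                have hg2 : PySem.List.pyGet? t 2 = some t2 := by
                  rw [show (2 : Int) = ((2 : Nat) : Int) by norm_num, pvTGet]; exact h2
                split at h
                next hd =>
                  simp only [Option.some.injEq, Prod.mk.injEq] at h
                  obtain ⟨hb1, hrs⟩ := h
                  subst hb1
                  rw [← hrs]
                  simp only [pvFindA, hq0, hq1, hbeq, Bool.false_eq_true, if_false, hsA,
                    hg1, hg2, hr]
                  rw [if_pos (beq_iff_eq.mpr hd)]
                  simp
                next hd =>
                  cases hrec : pvChain (triplets.take N.toNat) dst m (s :: seen) t1 with
                  | none => rw [hrec] at h; simp at h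
                  | some p =>
                    rw [hrec] at h
                    obtain ⟨b', rs'⟩ := p
                    simp only [Option.some.injEq, Prod.mk.injEq] at h
                    obtain ⟨hb1, hrs⟩ := h
                    subst hb1
                    rw [← hrs]
                    have hih := ih (s :: seen) t1 b' rs' hrec hd hbN fa [t1, dst]
                      (by rw [← hrs] at hfu; simp at hfu; omega)
                      (pvGet_pair t1 dst).1 (pvGet_pair t1 dst).2
                    simp only [pvFindA, hq0, hq1, hbeq, Bool.false_eq_true, if_false, hsA,
                      hg1, hg2, hr]
                    rw [if_neg (by simpa using hd), hih]
                    cases b' <;> (simp; try ring)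

-- B's loop computes product * (chain rates) on success and -1 on a dead end
theorem pvChainB (triplets : List (List String)) (dst : String) (N : Int) :
    ∀ (f : Nat) (seen : List String) (s : String) (b : Bool) (rs : List Int) (product : Int),
      pvChain (triplets.take N.toNat) dst f seen s = some (b, rs) →
      (b = false → N ≤ triplets.length) →
      pvLoopB triplets dst N f seen s product = if b then product * rs.prod else -1 := by
  intro f
  induction f with
  | zero => intro seen s b rs product h; simp [pvChain] at h
  | succ m ih =>
    intro seen s b rs product h hbN
    simp only [pvChain] at h
    split at h
    · simp at h
    next hmem =>
      cases hc : pvScanC (triplets.take N.toNat) s with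
      | none => rw [hc] at h; simp at h
      | some o =>
        rw [hc] at h
        cases o with
        | none =>
          simp only [Option.some.injEq, Prod.mk.injEq] at h
          obtain ⟨hb1, hrs⟩ := h
          subst hb1; subst hrs
          have hN : N ≤ triplets.length := hbN rfl
          have hsB : pvScanB triplets s dst (PySem.List.pyRange 0 N 1) =
              pvTabB (triplets.take N.toNat) s dst := by
            have := pvScanB_range N.toNat triplets s dst N hN 0 (by omega)
            simpa using this
          have htb := pvTabB_dead (triplets.take N.toNat) s dst hc
          simp only [pvLoopB, hmem, if_false, hsB, htb]
          simp
        | some t =>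
          dsimp only at h
          cases h1 : t[1]? with
          | none => rw [h1] at h; simp at h
          | some t1 =>
            rw [h1] at h; dsimp only at h
            cases h2 : t[2]? with
            | none => rw [h2] at h; simp at h
            | some t2 =>
              rw [h2] at h; dsimp only at h
              cases hr : PySem.Int.ofStr? t2 with
              | none => rw [hr] at h; simp at h
              | some r =>
                rw [hr] at h; dsimp only at h
                have hsB : pvScanB triplets s dst (PySem.List.pyRange 0 N 1) =
                    pvTabB (triplets.take N.toNat) s dst := by
                  have := pvScanB_range_found N.toNat triplets s dst N t 0 (by omega)
                    (by simpa using hc)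
                  simpa using this
                have htb := pvTabB_found (triplets.take N.toNat) s dst t t1 t2 r hc h1 h2 hr
                split at h
                next hd =>
                  simp only [Option.some.injEq, Prod.mk.injEq] at h
                  obtain ⟨hb1, hrs⟩ := h
                  subst hb1
                  rw [← hrs]
                  rw [if_pos hd] at htb
                  simp only [pvLoopB, hmem, if_false, hsB, htb]
                  simp
                next hd =>
                  cases hrec : pvChain (triplets.take N.toNat) dst m (s :: seen) t1 with
                  | none => rw [hrec] at h; simp at h
                  | some p =>
                    rw [hrec] at h
                    obtain ⟨b', rs'⟩ := p
                    simp only [Option.some.injEq, Prod.mk.injEq] at h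
                    obtain ⟨hb1, hrs⟩ := h
                    subst hb1
                    rw [← hrs]
                    rw [if_neg hd] at htb
                    have hih := ih (s :: seen) t1 b' rs' (product * r) hrec hbN
                    simp only [pvLoopB, hmem, if_false, hsB, htb, hih]
                    cases b' <;> (simp; try ring)

theorem find_ex_rate_spec : Claim_unchanged_find_ex_rate := by
  intro triplets query N hdom hpre hnd
  obtain ⟨hq2, hrest⟩ := hpre
  obtain ⟨hg0, hg1⟩ := pvQGet query hq2
  unfold find_ex_rate find_ex_rate_alt
  by_cases hq : query.getD 0 "" = query.getD 1 ""
  · simp only [hg0, hg1, pvFindA]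
    rw [if_pos (beq_iff_eq.mpr hq), if_pos (beq_iff_eq.mpr hq)]
  · have hok : pvChainOk triplets query N = true := hrest.resolve_left hq
    unfold pvChainOk pvChainTop at hok
    rw [pvWalk_eq_pvChain] at hok
    cases hchain : pvChain (triplets.take N.toNat) (query.getD 1 "")
        (triplets.length + 2) [] (query.getD 0 "") with
    | none => rw [hchain] at hok; simp at hok
    | some p =>
      obtain ⟨b, rs⟩ := p
      rw [hchain] at hok
      have hbN : b = false → N ≤ triplets.length := by
        intro hb; subst hb; simpa using hok
      have hlen := pvChain_len (triplets.take N.toNat) (query.getD 1 "")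
        (triplets.length + 2) [] (query.getD 0 "") b rs hchain
      have hA := pvChainA triplets (query.getD 1 "") N (triplets.length + 2) []
        (query.getD 0 "") b rs hchain hq hbN (triplets.length + 3) query (by omega) hg0 hg1
      have hB := pvChainB triplets (query.getD 1 "") N (triplets.length + 2) []
        (query.getD 0 "") b rs 1 hchain hbN
      cases b with
      | true =>
        have hA' : pvFindA triplets N (triplets.length + 3) query = rs.prod := by
          rw [hA]; norm_num
        have hB' : pvLoopB triplets (query.getD 1 "") N (triplets.length + 2) []
            (query.getD 0 "") 1 = rs.prod := by
          rw [hB]; norm_num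
        rw [hA']
        simp only [hg0, hg1]
        rw [if_neg (by simpa using hq), hB']
      | false =>
        have hbad : ¬ ((pvDeadWalk (triplets.take N.toNat) (query.getD 1 "")
            (triplets.length + 2) [] (query.getD 0 "")).getD 1 ≠ 1) := fun hb =>
          hnd ⟨hq2, hq, hb⟩
        rw [pvDeadWalk_eq, hchain] at hbad
        simp at hbad
        have hA' : pvFindA triplets N (triplets.length + 3) query = -1 := by
          rw [hA]; simp [hbad]
        have hB' : pvLoopB triplets (query.getD 1 "") N (triplets.length + 2) []
            (query.getD 0 "") 1 = -1 := by
          rw [hB]; norm_num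
        rw [hA']
        simp only [hg0, hg1]
        rw [if_neg (by simpa using hq), hB']

theorem find_ex_rate_changed : Claim_changed_find_ex_rate := by
  unfold Claim_changed_find_ex_rate; decide

theorem find_ex_rate_tight : Claim_exact_find_ex_rate := by
  intro triplets query N hdom hpre hd
  obtain ⟨hq2, hqne, hbad⟩ := hd
  have hok : pvChainOk triplets query N = true := hpre.2.resolve_left hqne
  unfold pvChainOk pvChainTop at hok
  rw [pvWalk_eq_pvChain] at hok
  obtain ⟨hg0, hg1⟩ := pvQGet query hq2
  rw [pvDeadWalk_eq] at hbad
  cases hchain : pvChain (triplets.take N.toNat) (query.getD 1 "")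
      (triplets.length + 2) [] (query.getD 0 "") with
  | none => rw [hchain] at hbad; simp at hbad
  | some p =>
    obtain ⟨b, rs⟩ := p
    rw [hchain] at hbad
    cases b with
    | true => simp at hbad
    | false =>
      simp at hbad
      have hbN : (false : Bool) = false → N ≤ triplets.length := fun _ => by
        rw [hchain] at hok; simpa using hok
      have hlen := pvChain_len (triplets.take N.toNat) (query.getD 1 "")
        (triplets.length + 2) [] (query.getD 0 "") false rs hchain
      have hfu : rs.length < triplets.length + 3 := by omega
      have hA := pvChainA triplets (query.getD 1 "") N (triplets.length + 2) []
        (query.getD 0 "") false rs hchain hqne hbN (triplets.length + 3) query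
        hfu hg0 hg1
      have hB := pvChainB triplets (query.getD 1 "") N (triplets.length + 2) []
        (query.getD 0 "") false rs 1 hchain hbN
      have hA' : pvFindA triplets N (triplets.length + 3) query = -rs.prod := by
        rw [hA]; norm_num
      have hB' : pvLoopB triplets (query.getD 1 "") N (triplets.length + 2) []
          (query.getD 0 "") 1 = -1 := by
        rw [hB]; norm_num
      unfold find_ex_rate find_ex_rate_alt
      rw [hA']
      simp only [hg0, hg1]
      rw [if_neg (by simpa using hqne), hB']
      intro heq
      exact hbad (by linarith)
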